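-- pv_equiv track=rewrite | github.com/monstermosh789/Automatizacion-Tesis | pruebas3.py | normalizar_rut
-- ===== SOURCE A (Python) =====
-- def normalizar_rut(rut_str):
--     if not isinstance(rut_str, str) or not rut_str.strip():
--         return None
--     rut_str = rut_str.upper().replace(".", "").replace("-", "").replace(" ", "")
--     cuerpo = rut_str[:-1]
--     dv = rut_str[-1]
--     if not cuerpo.isdigit():
--         return None
--     cuerpo_invertido = cuerpo[::-1]
--     trozos = [cuerpo_invertido[i:i+3] for i in range(0, len(cuerpo_invertido), 3)]
--     cuerpo_formateado = ".".join(trozos)[::-1]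
--     rut_normalizado = f"{cuerpo_formateado}-{dv}"
--     return rut_normalizado
-- ===== SOURCE B (Python) =====
-- def normalizar_rut(rut_str):
--     if not isinstance(rut_str, str) or not rut_str.strip():
--         return None
--     limpio = rut_str.upper().replace(".", "").replace("-", "").replace(" ", "")
--     cuerpo = limpio[:-1]
--     dv = limpio[-1]
--     if not cuerpo.isdigit():
--         return None
--     fmt = ""
--     resto = cuerpo
--     while len(resto) > 3:
--         fmt = "." + resto[-3:] + fmt
--         resto = resto[:-3]
--     return resto + fmt + "-" + dv
-- ===== Notes on version B (the rewrite author's own statement) =====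
-- stated objective: alternative
-- what changed: A reverses the body, slices it into 3-chunks with a range comprehension, joins with '.' and reverses again; B keeps the body in natural order and runs one while loop that peels three digits off the end at a time, prefixing '.'+group onto an accumulator string, with no reversal, chunk list or join.
-- outside the precondition, e.g. on normalizar_rut('.'): A raises IndexError, B raises IndexError
import Mathlib
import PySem

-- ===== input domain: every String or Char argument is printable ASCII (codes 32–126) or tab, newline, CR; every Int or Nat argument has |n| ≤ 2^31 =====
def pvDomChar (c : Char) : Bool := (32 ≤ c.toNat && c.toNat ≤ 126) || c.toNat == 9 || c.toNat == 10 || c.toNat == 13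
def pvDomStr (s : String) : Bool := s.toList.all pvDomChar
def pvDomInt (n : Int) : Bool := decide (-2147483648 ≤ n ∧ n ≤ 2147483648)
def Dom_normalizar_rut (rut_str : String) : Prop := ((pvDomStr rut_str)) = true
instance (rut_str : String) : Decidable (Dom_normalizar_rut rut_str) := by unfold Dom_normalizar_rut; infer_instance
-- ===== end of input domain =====

-- B replaces A's reverse / 3-chunk comprehension / join / reverse grouping by a single
-- back-to-front accumulator loop with no reversal and no chunk list (objective: alternative).

-- ===== PORT A =====
-- literal transliteration of A: strip guard, clean, cuerpo/dv split, reverse, 3-chunks via range, join, reverse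
def normalizar_rut (rut_str : String) : Option String :=
  if PySem.Str.strip rut_str = "" then none
  else
    let s := (PySem.Str.replace (PySem.Str.replace (PySem.Str.replace
                (PySem.Str.upper rut_str) "." "") "-" "") " " "").toList
    let cuerpo := PySem.List.slice s none (some (-1))        -- rut_str[:-1]
    match PySem.List.pyGet? s (-1) with                      -- rut_str[-1]  (none = IndexError, outside Pre_)
    | none => none
    | some dv =>
      if PySem.Chars.strIsdigit cuerpo = false then none
      else
        let cuerpo_invertido := cuerpo.reverse               -- cuerpo[::-1] (exact: PySem slice?_none_none_neg_one)
        let trozos := (PySem.List.pyRange 0 (cuerpo_invertido.length : Int) 3).map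
                        (fun i => PySem.List.slice cuerpo_invertido (some i) (some (i + 3)))
        let cuerpo_formateado := (PySem.Chars.join ['.'] trozos).reverse
        some (String.ofList (cuerpo_formateado ++ ['-', dv]))

-- ===== PORT B =====
-- B's while loop: peel three digits off the end of `resto`, prefixing '.' + them onto `fmt`
def gruposFmt (resto fmt : List Char) : List Char :=
  if 3 < resto.length then
    gruposFmt (PySem.List.slice resto none (some (-3)))      -- resto[:-3]
              ('.' :: (PySem.List.slice resto (some (-3)) none ++ fmt))   -- "." + resto[-3:] + fmt
  else resto ++ fmt
termination_by resto.length
decreasing_by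
  rw [PySem.List.slice_to_neg_ofNat resto 3 (by omega)]
  simp only [List.length_take]
  omega

def normalizar_rut_alt (rut_str : String) : Option String :=
  if PySem.Str.strip rut_str = "" then none
  else
    let limpio := (PySem.Str.replace (PySem.Str.replace (PySem.Str.replace
                    (PySem.Str.upper rut_str) "." "") "-" "") " " "").toList
    let cuerpo := PySem.List.slice limpio none (some (-1))   -- limpio[:-1]
    match PySem.List.pyGet? limpio (-1) with                 -- limpio[-1]  (none = IndexError, outside Pre_)
    | none => none
    | some dv =>
      if PySem.Chars.strIsdigit cuerpo = false then none
      else some (String.ofList (gruposFmt cuerpo [] ++ ['-', dv]))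

-- ===== PRECONDITION & SPEC =====
-- Pre_ excludes only inputs on which A RAISES IndexError (B raises identically there): a string that is
-- not all-whitespace but whose separator-stripped form is empty (e.g. "." or "- ."), so rut_str[-1] fails.
def Pre_normalizar_rut (rut_str : String) : Prop :=
  PySem.Str.strip rut_str = "" ∨
  (PySem.Str.replace (PySem.Str.replace (PySem.Str.replace
      (PySem.Str.upper rut_str) "." "") "-" "") " " "").toList ≠ []
instance (rut_str : String) : Decidable (Pre_normalizar_rut rut_str) := by
  unfold Pre_normalizar_rut; infer_instance

def pvWitness_normalizar_rut : String := "12.345.678-5"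

def Spec_normalizar_rut (rut_str : String) (out : Option String) : Prop := out = normalizar_rut_alt rut_str
instance (rut_str : String) (out : Option String) : Decidable (Spec_normalizar_rut rut_str out) := by unfold Spec_normalizar_rut; infer_instance

-- ===== CLAIM (what is proved, stated in full; the proofs are below) =====
def Claim_equal_normalizar_rut : Prop := ∀ (rut_str : String), Dom_normalizar_rut rut_str → Pre_normalizar_rut rut_str → Spec_normalizar_rut rut_str (normalizar_rut rut_str)

-- ===== LEMMAS AND PROOFS =====

-- A's chunk comprehension, as structural recursion
def chunkRec (m : List Char) : List (List Char) :=
  if m = [] then [] else m.take 3 :: chunkRec (m.drop 3)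
termination_by m.length
decreasing_by
  rename_i h
  have := List.length_pos_of_ne_nil h
  simp only [List.length_drop]; omega

lemma chunkRec_ne_nil (m : List Char) (h : m ≠ []) : chunkRec m ≠ [] := by
  rw [chunkRec.eq_def]; simp [h]

lemma pyRange3_cons (n : Int) (h : 0 < n) :
    PySem.List.pyRange 0 n 3 = 0 :: (PySem.List.pyRange 0 (n - 3) 3).map (· + 3) := by
  rw [PySem.List.pyRange_of_pos 0 n (by omega), PySem.List.pyRange_of_pos 0 (n - 3) (by omega)]
  have hc : (if (0:Int) < n then ((n - 0 + 3 - 1) / 3).toNat else 0)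
      = (if (0:Int) < n - 3 then ((n - 3 - 0 + 3 - 1) / 3).toNat else 0) + 1 := by
    split_ifs <;> omega
  rw [hc, List.range_succ_eq_map]
  simp only [List.map_cons, List.map_map]
  refine List.cons_eq_cons.mpr ⟨by norm_num, ?_⟩
  apply List.map_congr_left
  intro k _
  simp only [Function.comp_apply, Nat.succ_eq_add_one]
  push_cast
  ring

lemma chunks_eq_aux : ∀ (fuel : Nat) (m : List Char), m.length ≤ fuel →
    (PySem.List.pyRange 0 (m.length : Int) 3).map
      (fun i => PySem.List.slice m (some i) (some (i + 3))) = chunkRec m := by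
  intro fuel
  induction fuel with
  | zero =>
    intro m hm
    have hnil : m = [] := List.eq_nil_of_length_eq_zero (by omega)
    subst hnil
    rw [chunkRec.eq_def]
    simp [PySem.List.pyRange_of_pos 0 0 (show (0:Int) < 3 by omega)]
  | succ f ih =>
    intro m hm
    by_cases hnil : m = []
    · subst hnil
      rw [chunkRec.eq_def]
      simp [PySem.List.pyRange_of_pos 0 0 (show (0:Int) < 3 by omega)]
    · have hlen : 0 < m.length := List.length_pos_of_ne_nil hnil
      rw [pyRange3_cons (m.length : Int) (by exact_mod_cast hlen)]
      rw [chunkRec.eq_def, if_neg hnil]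
      simp only [List.map_cons, List.map_map]
      refine List.cons_eq_cons.mpr ⟨?_, ?_⟩
      · rw [PySem.List.slice_toNat m (a := 0) (b := 0 + 3) (by omega) (by omega)]
        simp
      · by_cases h3 : m.length ≤ 3
        · have h1 : PySem.List.pyRange 0 ((m.length : Int) - 3) 3 = [] := by
            rw [PySem.List.pyRange_of_pos 0 _ (show (0:Int) < 3 by omega)]
            simp only [if_neg (by omega : ¬ ((0:Int) < (m.length : Int) - 3))]
            simp
          have h2 : m.drop 3 = [] :=
            List.eq_nil_of_length_eq_zero (by simp only [List.length_drop]; omega)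
          rw [h1, h2, chunkRec.eq_def]
          simp
        · have hlen3 : ((m.drop 3).length : Int) = (m.length : Int) - 3 := by
            simp only [List.length_drop]; omega
          have hih := ih (m.drop 3) (by simp only [List.length_drop]; omega)
          rw [hlen3] at hih
          rw [← hih]
          apply List.map_congr_left
          intro i hi
          have hmem := (PySem.List.mem_pyRange_iff_of_pos (show (0:Int) < 3 by omega) i).mp hi
          have hi0 : 0 ≤ i := hmem.1
          simp only [Function.comp_apply]
          rw [PySem.List.slice_toNat m (a := i + 3) (b := i + 3 + 3) (by omega) (by omega),
              PySem.List.slice_toNat (m.drop 3) (a := i) (b := i + 3) (by omega) (by omega)]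
          rw [List.drop_drop]
          congr 1
          · omega
          · congr 1; omega

lemma chunks_eq (m : List Char) :
    (PySem.List.pyRange 0 (m.length : Int) 3).map
      (fun i => PySem.List.slice m (some i) (some (i + 3))) = chunkRec m :=
  chunks_eq_aux m.length m le_rfl

-- core: A's reversed '.'-join of the 3-chunks of the reversed body equals B's accumulator loop
lemma gruposFmt_eq_aux : ∀ (fuel : Nat) (m fmt : List Char), m.length ≤ fuel →
    gruposFmt m fmt = (PySem.Chars.join ['.'] (chunkRec m.reverse)).reverse ++ fmt := by
  intro fuel
  induction fuel with
  | zero =>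
    intro m fmt hm
    have hnil : m = [] := List.eq_nil_of_length_eq_zero (by omega)
    subst hnil
    rw [gruposFmt.eq_def, chunkRec.eq_def]
    simp [PySem.Chars.join_nil]
  | succ f ih =>
    intro m fmt hm
    by_cases h3 : 3 < m.length
    · rw [gruposFmt.eq_def, if_pos h3]
      rw [PySem.List.slice_to_neg_ofNat m 3 (by omega),
          PySem.List.slice_from_neg_ofNat m 3 (by omega)]
      rw [ih (m.take (m.length - 3)) _ (by simp only [List.length_take]; omega)]
      have hrev : chunkRec m.reverse
          = m.reverse.take 3 :: chunkRec (m.reverse.drop 3) := by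
        rw [chunkRec.eq_def,
            if_neg (by simp only [List.reverse_eq_nil_iff] at *; intro hc; subst hc; simp at h3)]
      have htake : m.reverse.take 3 = (m.drop (m.length - 3)).reverse := List.take_reverse
      have hdrop : m.reverse.drop 3 = (m.take (m.length - 3)).reverse := List.drop_reverse
      have hne : chunkRec (m.reverse.drop 3) ≠ [] := by
        rw [hdrop]
        apply chunkRec_ne_nil
        intro hc
        have := congrArg List.length hc
        simp at this
        omega
      rw [hrev]
      obtain ⟨q, rest, hq⟩ : ∃ q rest, chunkRec (m.reverse.drop 3) = q :: rest := by
        cases hcc : chunkRec (m.reverse.drop 3) with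
        | nil => exact absurd hcc hne
        | cons q rest => exact ⟨q, rest, rfl⟩
      rw [hq, PySem.Chars.join_cons_cons, ← hq, htake, hdrop]
      simp
    · rw [gruposFmt.eq_def, if_neg h3]
      by_cases hnil : m = []
      · subst hnil
        rw [chunkRec.eq_def]
        simp [PySem.Chars.join_nil]
      · have hone : chunkRec m.reverse = [m.reverse.take 3] := by
          rw [chunkRec.eq_def, if_neg (by simpa using hnil), chunkRec.eq_def,
              if_pos (List.eq_nil_of_length_eq_zero
                        (by simp only [List.length_drop, List.length_reverse]; omega))]
        rw [hone, PySem.Chars.join_singleton,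
            List.take_of_length_le (by simp only [List.length_reverse]; omega)]
        simp

lemma gruposFmt_eq (m : List Char) :
    gruposFmt m [] = (PySem.Chars.join ['.'] (chunkRec m.reverse)).reverse := by
  simpa using gruposFmt_eq_aux m.length m [] le_rfl

-- ===== VERDICT (by name: the statement is the Claim_ definition above) =====
theorem normalizar_rut_spec : Claim_equal_normalizar_rut := by
  intro rut_str _hdom hpre
  unfold Spec_normalizar_rut normalizar_rut normalizar_rut_alt
  by_cases hstrip : PySem.Str.strip rut_str = ""
  · simp [hstrip]
  · simp only [if_neg hstrip]
    have hs : (PySem.Str.replace (PySem.Str.replace (PySem.Str.replace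
        (PySem.Str.upper rut_str) "." "") "-" "") " " "").toList ≠ [] := by
      unfold Pre_normalizar_rut at hpre
      exact hpre.resolve_left hstrip
    set s := (PySem.Str.replace (PySem.Str.replace (PySem.Str.replace
        (PySem.Str.upper rut_str) "." "") "-" "") " " "").toList with hsdef
    cases hget : PySem.List.pyGet? s (-1) with
    | none =>
      exfalso
      rw [PySem.List.pyGet?_eq_none_iff] at hget
      apply hget
      have : 0 < s.length := List.length_pos_of_ne_nil hs
      constructor <;> omega
    | some dv =>
      dsimp only
      by_cases hdig : PySem.Chars.strIsdigit (PySem.List.slice s none (some (-1))) = false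
      · simp [hdig]
      · rw [if_neg hdig, if_neg hdig]
        rw [chunks_eq, gruposFmt_eq]
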